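-- pv_equiv track=rewrite | github.com/erdurano/rich_img | rich_img_widget/image.py | get_cell_from_pattern
-- ===== SOURCE A (Python) =====
-- from typing import Sequence, Tuple
-- from typing import NamedTuple
--
-- Pixel = Tuple[int, int, int]
--
-- class RasterCell(NamedTuple):
--     '''
--     Represents equivalent cell to a 4 by 8 pixels region as foreground color,
--     background color and character
--     '''
--     fg_color: Tuple[int, int, int]
--     bg_color: Tuple[int, int, int]
--     char: str
--
-- def get_color_avg(pixels: Sequence[Tuple[int, int, int]]) -> Tuple[int, int, int]:
--     """Returns average color of a grup of pixels represented by rgb 3tuple"""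
--     if not pixels:
--         return (0, 0, 0)
--     size = len(pixels)
--     red_total, green_total, blue_total = 0, 0, 0
--     for red, green, blue in pixels:
--         red_total += red
--         green_total += green
--         blue_total += blue
--
--     return (red_total // size, green_total // size, blue_total // size)
--
-- def get_cell_from_pattern(pixels: Sequence[Pixel],
--                           codepoint: int = 0x2584,
--                           pattern: int = 0x0000ffff) -> RasterCell:
--     """
--     Returns a raster cell from flattend pixel sequence with a
--     code point with a specified pattern. Defaults to half block.
--     """
--
--     mask = 0x80000000
--     fg_pixels = []
--     bg_pixels = []
--     for pixel in pixels:
--         if mask & pattern: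
--             fg_pixels.append(pixel)
--         else:
--             bg_pixels.append(pixel)
--         mask >>= 1
--     fg_color = get_color_avg(fg_pixels)
--     bg_color = get_color_avg(bg_pixels)
--
--     return RasterCell(fg_color, bg_color, chr(codepoint))
-- ===== SOURCE B (Python) =====
-- from typing import Sequence, Tuple
-- from typing import NamedTuple
--
-- Pixel = Tuple[int, int, int]
--
-- class RasterCell(NamedTuple):
--     fg_color: Tuple[int, int, int]
--     bg_color: Tuple[int, int, int]
--     char: str
--
-- def get_cell_from_pattern(pixels: Sequence[Pixel],
--                           codepoint: int = 0x2584,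
--                           pattern: int = 0x0000ffff) -> RasterCell:
--     """Single pass: accumulate channel totals and counts per group directly."""
--     mask = 0x80000000
--     fr = fg = fb = fn = 0
--     br = bg = bb = bn = 0
--     for r, g, b in pixels:
--         if mask & pattern:
--             fr += r; fg += g; fb += b; fn += 1
--         else:
--             br += r; bg += g; bb += b; bn += 1
--         mask >>= 1
--     fg_color = (fr // fn, fg // fn, fb // fn) if fn else (0, 0, 0)
--     bg_color = (br // bn, bg // bn, bb // bn) if bn else (0, 0, 0)
--     return RasterCell(fg_color, bg_color, chr(codepoint))
-- ===== Notes on version B (the rewrite author's own statement) =====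
-- stated objective: simpler
-- what changed: One fused pass keeps running channel totals and counts for each group instead of partitioning pixels into two lists and averaging each list with the get_color_avg helper (partition pass plus two summing passes collapsed into one, no intermediate lists, helper removed).
import Mathlib
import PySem

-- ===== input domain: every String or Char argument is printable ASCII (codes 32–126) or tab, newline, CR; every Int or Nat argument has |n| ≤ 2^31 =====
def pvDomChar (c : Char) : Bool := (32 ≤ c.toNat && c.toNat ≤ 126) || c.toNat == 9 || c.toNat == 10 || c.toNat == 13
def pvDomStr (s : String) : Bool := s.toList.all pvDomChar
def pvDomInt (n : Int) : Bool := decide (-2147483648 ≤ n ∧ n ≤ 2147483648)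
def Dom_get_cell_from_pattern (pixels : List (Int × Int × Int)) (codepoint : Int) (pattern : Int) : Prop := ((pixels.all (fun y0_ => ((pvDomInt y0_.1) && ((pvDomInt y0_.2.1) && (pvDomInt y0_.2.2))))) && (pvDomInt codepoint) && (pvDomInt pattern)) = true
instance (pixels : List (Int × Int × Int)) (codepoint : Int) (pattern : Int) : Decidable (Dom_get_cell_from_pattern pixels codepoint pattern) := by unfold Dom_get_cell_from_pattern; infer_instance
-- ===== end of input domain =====

-- B fuses A's partition pass and the two get_color_avg summing passes into one pass over
-- running totals and counts; equivalence is proved on all inputs where chr(codepoint) returns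
-- a character Lean's Char can represent (Pre_ below).

-- ===== PORT A =====
-- helper get_color_avg, step for step
def get_color_avg (pixels : List (Int × Int × Int)) : Int × Int × Int :=
  if pixels = [] then (0, 0, 0)
  else
    let size : Int := pixels.length
    let t := pixels.foldl
      (fun (acc : Int × Int × Int) p => (acc.1 + p.1, acc.2.1 + p.2.1, acc.2.2 + p.2.2))
      (0, 0, 0)
    (PySem.Int.floordiv t.1 size, PySem.Int.floordiv t.2.1 size, PySem.Int.floordiv t.2.2 size)

def get_cell_from_pattern (pixels : List (Int × Int × Int)) (codepoint : Int) (pattern : Int) : (Int × Int × Int) × (Int × Int × Int) × String :=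
  let st := pixels.foldl
    (fun (st : Int × List (Int × Int × Int) × List (Int × Int × Int)) p =>
      if PySem.Int.band st.1 pattern ≠ 0 then (st.1 >>> 1, st.2.1 ++ [p], st.2.2)
      else (st.1 >>> 1, st.2.1, st.2.2 ++ [p]))
    (0x80000000, [], [])
  -- chr(codepoint): exact under Pre_ (valid non-surrogate scalar value)
  (get_color_avg st.2.1, get_color_avg st.2.2, String.ofList [Char.ofNat codepoint.toNat])

-- ===== PORT B =====
-- B's state: (mask, (fr, fg, fb, fn), (br, bg, bb, bn))
def pvBStep (pattern : Int) (st : Int × (Int × Int × Int × Int) × (Int × Int × Int × Int)) (p : Int × Int × Int) : Int × (Int × Int × Int × Int) × (Int × Int × Int × Int) :=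
  if PySem.Int.band st.1 pattern ≠ 0 then
    (st.1 >>> 1, (st.2.1.1 + p.1, st.2.1.2.1 + p.2.1, st.2.1.2.2.1 + p.2.2, st.2.1.2.2.2 + 1), st.2.2)
  else
    (st.1 >>> 1, st.2.1, (st.2.2.1 + p.1, st.2.2.2.1 + p.2.1, st.2.2.2.2.1 + p.2.2, st.2.2.2.2.2 + 1))

def pvBColor (t : Int × Int × Int × Int) : Int × Int × Int :=
  if t.2.2.2 ≠ 0 then
    (PySem.Int.floordiv t.1 t.2.2.2, PySem.Int.floordiv t.2.1 t.2.2.2, PySem.Int.floordiv t.2.2.1 t.2.2.2)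
  else (0, 0, 0)

def get_cell_from_pattern_alt (pixels : List (Int × Int × Int)) (codepoint : Int) (pattern : Int) : (Int × Int × Int) × (Int × Int × Int) × String :=
  let st := pixels.foldl (pvBStep pattern) (0x80000000, (0, 0, 0, 0), (0, 0, 0, 0))
  (pvBColor st.2.1, pvBColor st.2.2, String.ofList [Char.ofNat codepoint.toNat])

-- ===== PRECONDITION & SPEC =====
-- Pre_ excludes codepoints on which Python's chr raises (negative or ≥ 0x110000) and the
-- surrogate range 0xD800–0xDFFF, where A returns a one-character str that Lean's String
-- cannot represent (B returns the same unrepresentable value there).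
def Pre_get_cell_from_pattern (pixels : List (Int × Int × Int)) (codepoint : Int) (pattern : Int) : Prop :=
  0 ≤ codepoint ∧ codepoint < 1114112 ∧ ¬ (55296 ≤ codepoint ∧ codepoint < 57344)
instance (pixels : List (Int × Int × Int)) (codepoint : Int) (pattern : Int) : Decidable (Pre_get_cell_from_pattern pixels codepoint pattern) := by unfold Pre_get_cell_from_pattern; infer_instance

def pvWitness_get_cell_from_pattern : (List (Int × Int × Int)) × Int × Int := ([(10, 20, 30), (1, 2, 3)], 9604, 65535)

def Spec_get_cell_from_pattern (pixels : List (Int × Int × Int)) (codepoint : Int) (pattern : Int) (out : (Int × Int × Int) × (Int × Int × Int) × String) : Prop := out = get_cell_from_pattern_alt pixels codepoint pattern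
instance (pixels : List (Int × Int × Int)) (codepoint : Int) (pattern : Int) (out : (Int × Int × Int) × (Int × Int × Int) × String) : Decidable (Spec_get_cell_from_pattern pixels codepoint pattern out) := by unfold Spec_get_cell_from_pattern; infer_instance

-- ===== CLAIM (what is proved, stated in full; the proofs are below) =====
def Claim_equal_get_cell_from_pattern : Prop := ∀ (pixels : List (Int × Int × Int)) (codepoint : Int) (pattern : Int), Dom_get_cell_from_pattern pixels codepoint pattern → Pre_get_cell_from_pattern pixels codepoint pattern → Spec_get_cell_from_pattern pixels codepoint pattern (get_cell_from_pattern pixels codepoint pattern)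

-- ===== LEMMAS AND PROOFS =====

-- stats of a list: (sum of reds, sum of greens, sum of blues, length)
def pvStats (l : List (Int × Int × Int)) : Int × Int × Int × Int :=
  (((l.map (·.1)).sum), ((l.map (·.2.1)).sum), ((l.map (·.2.2)).sum), (l.length : Int))

lemma pvStats_append (l : List (Int × Int × Int)) (p : Int × Int × Int) :
    pvStats (l ++ [p]) = (((pvStats l).1 + p.1, (pvStats l).2.1 + p.2.1, (pvStats l).2.2.1 + p.2.2, (pvStats l).2.2.2 + 1)) := by
  simp [pvStats]

-- B's loop tracks exactly the stats of A's two lists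
lemma pvLoop_agree (pixels : List (Int × Int × Int)) (pattern : Int) :
    ∀ (mask : Int) (fg bg : List (Int × Int × Int)),
    pixels.foldl (pvBStep pattern) (mask, pvStats fg, pvStats bg) =
      (let st := pixels.foldl
        (fun (st : Int × List (Int × Int × Int) × List (Int × Int × Int)) p =>
          if PySem.Int.band st.1 pattern ≠ 0 then (st.1 >>> 1, st.2.1 ++ [p], st.2.2)
          else (st.1 >>> 1, st.2.1, st.2.2 ++ [p]))
        (mask, fg, bg)
       (st.1, pvStats st.2.1, pvStats st.2.2)) := by
  induction pixels with
  | nil => intro mask fg bg; simp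
  | cons p rest ih =>
    intro mask fg bg
    by_cases h : PySem.Int.band mask pattern = 0
    · simpa [pvBStep, h, pvStats_append] using ih (mask >>> 1) fg (bg ++ [p])
    · simpa [pvBStep, h, pvStats_append] using ih (mask >>> 1) (fg ++ [p]) bg

-- A's get_color_avg equals B's pvBColor on the list's stats
lemma pvColor_agree (l : List (Int × Int × Int)) : get_color_avg l = pvBColor (pvStats l) := by
  cases l with
  | nil => simp [get_color_avg, pvBColor, pvStats]
  | cons x xs =>
    have hfold : ∀ (ys : List (Int × Int × Int)) (a : Int × Int × Int),
        ys.foldl (fun (acc : Int × Int × Int) p => (acc.1 + p.1, acc.2.1 + p.2.1, acc.2.2 + p.2.2)) a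
          = (a.1 + ((ys.map (·.1)).sum), a.2.1 + ((ys.map (·.2.1)).sum), a.2.2 + ((ys.map (·.2.2)).sum)) := by
      intro ys
      induction ys with
      | nil => intro a; simp
      | cons y ys ih => intro a; simp [ih]; ring_nf; trivial
    have hlen : ((xs.length : Int) + 1) ≠ 0 := by omega
    simp only [get_color_avg, pvBColor, pvStats, hfold]
    simp [hlen]

-- ===== VERDICT (by name: the statement is the Claim_ definition above) =====
theorem get_cell_from_pattern_spec : Claim_equal_get_cell_from_pattern := by
  intro pixels codepoint pattern _ _
  unfold Spec_get_cell_from_pattern get_cell_from_pattern get_cell_from_pattern_alt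
  have h := pvLoop_agree pixels pattern 0x80000000 [] []
  have h0 : pvStats ([] : List (Int × Int × Int)) = (0, 0, 0, 0) := by simp [pvStats]
  rw [h0] at h
  simp only [h, pvColor_agree]
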